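-- pv_equiv track=rewrite | github.com/wotann07/leetcode | trip_optimizer.py | get_optimal_routes
-- ===== SOURCE A (Python) =====
-- def get_optimal_routes(max_distance: int, dest: [], ret: []):
--     optimal_d = 0
--     optimal_routes = []
--     for d in dest:
--         for r in ret:
--             total_d = d[1] + r[1]
--             if total_d <= max_distance:
--                 if total_d >= optimal_d:
--                     if total_d > optimal_d:
--                         optimal_routes.clear()
--                         optimal_d = total_d
--                     optimal_routes.append([d[0], r[0]])
--
--     return optimal_routes
-- ===== SOURCE B (Python) =====
-- def get_optimal_routes(max_distance: int, dest: [], ret: []):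
--     result = []
--     if max_distance < 0 or not dest or not ret:
--         return result
--     # distinct return distances, ascending
--     sums = sorted(set(r[1] for r in ret))
--     # best achievable total (floor 0): for each destination leg, binary-search
--     # the largest return distance that still fits within max_distance
--     best = 0
--     for d in dest:
--         limit = max_distance - d[1]
--         lo, hi = 0, len(sums)
--         while lo < hi:
--             mid = (lo + hi) // 2
--             if sums[mid] <= limit:
--                 lo = mid + 1
--             else:
--                 hi = mid
--         if lo > 0:
--             cand = d[1] + sums[lo - 1]
--             if cand > best:
--                 best = cand
--     # index return legs by their distance (preserving order)
--     by_sum = {}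
--     for r in ret:
--         by_sum[r[1]] = by_sum.get(r[1], []) + [r[0]]
--     # collect, in destination order, every pairing that reaches best
--     for d in dest:
--         for r0 in by_sum.get(best - d[1], []):
--             result.append([d[0], r0])
--     return result
-- ===== Notes on version B (the rewrite author's own statement) =====
-- stated objective: faster
-- what changed: Replaces the quadratic scan-with-clear/append over all dest x ret pairs by: sort the distinct return distances once and binary-search, per destination, the largest return distance that still fits to get the optimal total, then collect the pairs via a dict indexing return legs by distance, so no inner scan over ret remains.
import Mathlib
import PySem

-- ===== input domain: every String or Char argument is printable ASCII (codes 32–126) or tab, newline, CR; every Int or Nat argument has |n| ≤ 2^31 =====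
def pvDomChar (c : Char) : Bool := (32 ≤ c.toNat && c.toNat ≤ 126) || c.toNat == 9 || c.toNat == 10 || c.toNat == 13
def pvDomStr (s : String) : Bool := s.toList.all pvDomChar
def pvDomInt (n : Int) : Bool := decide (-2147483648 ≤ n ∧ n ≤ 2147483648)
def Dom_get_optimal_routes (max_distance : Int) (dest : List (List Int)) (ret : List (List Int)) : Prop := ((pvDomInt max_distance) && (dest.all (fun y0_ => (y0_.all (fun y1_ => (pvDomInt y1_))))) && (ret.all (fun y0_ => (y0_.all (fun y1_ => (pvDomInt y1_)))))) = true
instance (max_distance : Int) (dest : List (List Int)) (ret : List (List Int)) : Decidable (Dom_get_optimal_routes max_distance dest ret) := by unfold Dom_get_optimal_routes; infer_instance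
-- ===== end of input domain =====

-- B replaces A's quadratic scan over all dest x ret pairs by sort + per-destination
-- binary search for the optimal total, then dict-indexed collection (faster in a timing run).


-- ===== PORT A =====
-- one iteration of A's inner loop body (state = (optimal_d, optimal_routes))
def pvAStep (max_distance : Int) (d : List Int) (st : Int × List (List Int)) (r : List Int) :
    Int × List (List Int) :=
  let total_d := d.getD 1 0 + r.getD 1 0
  if total_d ≤ max_distance then
    if st.1 ≤ total_d then
      if st.1 < total_d then (total_d, [[d.getD 0 0, r.getD 0 0]])
      else (st.1, st.2 ++ [[d.getD 0 0, r.getD 0 0]])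
    else st
  else st

def get_optimal_routes (max_distance : Int) (dest : List (List Int)) (ret : List (List Int)) : List (List Int) :=
  (dest.foldl (fun st d => ret.foldl (pvAStep max_distance d) st) (0, [])).2

-- ===== PORT B =====
-- B's hand-written while-loop binary search (final value of lo), recursion on hi - lo
def pvBisect (s : List Int) (limit : Int) (lo hi : Nat) : Nat :=
  if _h : lo < hi then
    if s.getD ((lo + hi) / 2) 0 ≤ limit then pvBisect s limit ((lo + hi) / 2 + 1) hi
    else pvBisect s limit lo ((lo + hi) / 2)
  else lo
termination_by hi - lo
decreasing_by all_goals omega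

def get_optimal_routes_alt (max_distance : Int) (dest : List (List Int)) (ret : List (List Int)) : List (List Int) :=
  if max_distance < 0 ∨ dest = [] ∨ ret = [] then [] else
  let sums := PySem.List.sorted (PySem.Set.ofList (ret.map (fun r => r.getD 1 0))) (fun x => x) false
  let best := dest.foldl (fun b d =>
      let lo := pvBisect sums (max_distance - d.getD 1 0) 0 sums.length
      if 0 < lo then
        if b < d.getD 1 0 + sums.getD (lo - 1) 0 then d.getD 1 0 + sums.getD (lo - 1) 0 else b
      else b) 0
  let bySum := ret.foldl (fun (dic : PySem.Dict Int (List Int)) r =>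
      dic.modify (r.getD 1 0) [] (· ++ [r.getD 0 0])) PySem.Dict.empty
  dest.foldl (fun acc d =>
      acc ++ (bySum.getD (best - d.getD 1 0) []).map (fun r0 => [d.getD 0 0, r0])) []

-- ===== PRECONDITION & SPEC =====
-- Pre_ excludes only inputs where A raises IndexError: some inner list shorter than 2
-- while both outer lists are nonempty (so d[1]/r[1] is actually evaluated).
def Pre_get_optimal_routes (max_distance : Int) (dest : List (List Int)) (ret : List (List Int)) : Prop :=
  dest = [] ∨ ret = [] ∨ ((∀ d ∈ dest, 2 ≤ d.length) ∧ (∀ r ∈ ret, 2 ≤ r.length))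
instance (max_distance : Int) (dest : List (List Int)) (ret : List (List Int)) : Decidable (Pre_get_optimal_routes max_distance dest ret) := by unfold Pre_get_optimal_routes; infer_instance

def pvWitness_get_optimal_routes : Int × List (List Int) × List (List Int) :=
  (10, [[1, 3], [2, 4]], [[5, 6], [7, 2]])

def Spec_get_optimal_routes (max_distance : Int) (dest : List (List Int)) (ret : List (List Int)) (out : List (List Int)) : Prop := out = get_optimal_routes_alt max_distance dest ret
instance (max_distance : Int) (dest : List (List Int)) (ret : List (List Int)) (out : List (List Int)) : Decidable (Spec_get_optimal_routes max_distance dest ret out) := by unfold Spec_get_optimal_routes; infer_instance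

-- ===== CLAIM (what is proved, stated in full; the proofs are below) =====
def Claim_equal_get_optimal_routes : Prop := ∀ (max_distance : Int) (dest : List (List Int)) (ret : List (List Int)), Dom_get_optimal_routes max_distance dest ret → Pre_get_optimal_routes max_distance dest ret → Spec_get_optimal_routes max_distance dest ret (get_optimal_routes max_distance dest ret)

-- ===== LEMMAS AND PROOFS =====

-- total distance of a pair
def pvT (d r : List Int) : Int := d.getD 1 0 + r.getD 1 0
-- the flattened pair sequence, in A's nested iteration order
def pvPairs (dest ret : List (List Int)) : List (List Int × List Int) :=
  dest.flatMap (fun d => ret.map (fun r => (d, r)))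
-- the maximal admissible total over a pair list (floor 0), as A's running best
def pvBest (M : Int) (ps : List (List Int × List Int)) : Int :=
  ps.foldl (fun b p => if pvT p.1 p.2 ≤ M ∧ b < pvT p.1 p.2 then pvT p.1 p.2 else b) 0
-- the pairs achieving a given best, in order
def pvCollect (M best : Int) (ps : List (List Int × List Int)) : List (List Int) :=
  ps.filterMap (fun p => if pvT p.1 p.2 ≤ M ∧ pvT p.1 p.2 = best
    then some [p.1.getD 0 0, p.2.getD 0 0] else none)

-- a nested fold over dest/ret is a fold over the flattened pair list
theorem pv_foldl_pairs {σ : Type} (dest ret : List (List Int)) (f : σ → List Int → List Int → σ) :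
    ∀ init : σ, dest.foldl (fun st d => ret.foldl (fun st r => f st d r) st) init
      = (pvPairs dest ret).foldl (fun st p => f st p.1 p.2) init := by
  induction dest with
  | nil => intro init; simp [pvPairs]
  | cons d t ih =>
    intro init
    simp only [List.foldl_cons, pvPairs, List.flatMap_cons, List.foldl_append, List.foldl_map]
    rw [ih]
    rfl

theorem pvBest_stats (M : Int) (ps : List (List Int × List Int)) :
    ∀ b : Int, b ≤ ps.foldl (fun b p => if pvT p.1 p.2 ≤ M ∧ b < pvT p.1 p.2 then pvT p.1 p.2 else b) b
      ∧ ∀ p ∈ ps, pvT p.1 p.2 ≤ M →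
          pvT p.1 p.2 ≤ ps.foldl (fun b p => if pvT p.1 p.2 ≤ M ∧ b < pvT p.1 p.2 then pvT p.1 p.2 else b) b := by
  induction ps with
  | nil => intro b; simp
  | cons q t ih =>
    intro b
    simp only [List.foldl_cons, List.mem_cons]
    constructor
    · have := (ih (if pvT q.1 q.2 ≤ M ∧ b < pvT q.1 q.2 then pvT q.1 q.2 else b)).1
      split_ifs at this ⊢ <;> omega
    · rintro p (rfl | hp) hpM
      · have := (ih (if pvT p.1 p.2 ≤ M ∧ b < pvT p.1 p.2 then pvT p.1 p.2 else b)).1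
        split_ifs at this ⊢ <;> omega
      · exact (ih _).2 p hp hpM

theorem pvBest_nonneg (M : Int) (ps : List (List Int × List Int)) : 0 ≤ pvBest M ps :=
  (pvBest_stats M ps 0).1

theorem pvBest_le_aux (M : Int) (ps : List (List Int × List Int)) :
    ∀ b : Int, b ≤ M → ps.foldl (fun b p => if pvT p.1 p.2 ≤ M ∧ b < pvT p.1 p.2 then pvT p.1 p.2 else b) b ≤ M := by
  induction ps with
  | nil => intro b hb; simpa using hb
  | cons q t ih =>
    intro b hb
    simp only [List.foldl_cons]
    apply ih
    split_ifs <;> omega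

theorem pvBest_le (M : Int) (ps : List (List Int × List Int)) (h : 0 ≤ M) : pvBest M ps ≤ M :=
  pvBest_le_aux M ps 0 h

theorem pvAStep_eq (M : Int) (d : List Int) (st : Int × List (List Int)) (r : List Int) :
    pvAStep M d st r = if pvT d r ≤ M then
      (if st.1 ≤ pvT d r then
        (if st.1 < pvT d r then (pvT d r, [[d.getD 0 0, r.getD 0 0]])
         else (st.1, st.2 ++ [[d.getD 0 0, r.getD 0 0]]))
       else st)
      else st := rfl

theorem pvBest_snoc (M : Int) (ps : List (List Int × List Int)) (p : List Int × List Int) :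
    pvBest M (ps ++ [p]) = if pvT p.1 p.2 ≤ M ∧ pvBest M ps < pvT p.1 p.2 then pvT p.1 p.2 else pvBest M ps := by
  simp only [pvBest, List.foldl_append, List.foldl_cons, List.foldl_nil]

theorem pvCollect_snoc (M x : Int) (ps : List (List Int × List Int)) (p : List Int × List Int) :
    pvCollect M x (ps ++ [p]) = pvCollect M x ps ++
      (if pvT p.1 p.2 ≤ M ∧ pvT p.1 p.2 = x then [[p.1.getD 0 0, p.2.getD 0 0]] else []) := by
  simp only [pvCollect, List.filterMap_append, List.filterMap_cons, List.filterMap_nil]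
  split_ifs <;> rfl

theorem pvCollect_nil_of_gt (M x : Int) (ps : List (List Int × List Int))
    (h : ∀ q ∈ ps, pvT q.1 q.2 ≤ M → pvT q.1 q.2 < x) : pvCollect M x ps = [] := by
  rw [pvCollect, List.filterMap_eq_nil_iff]
  intro q hq
  rcases Decidable.em (pvT q.1 q.2 ≤ M ∧ pvT q.1 q.2 = x) with hc | hc
  · exact absurd hc.2 (by have := h q hq hc.1; omega)
  · simp [hc]

-- characterization of A's loop state
theorem pvA_char (M : Int) (ps : List (List Int × List Int)) :
    ps.foldl (fun st p => pvAStep M p.1 st p.2) (0, []) = (pvBest M ps, pvCollect M (pvBest M ps) ps) := by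
  induction ps using List.reverseRecOn with
  | nil => simp [pvBest, pvCollect]
  | append_singleton ps p ih =>
    rw [List.foldl_append, List.foldl_cons, List.foldl_nil, ih, pvAStep_eq, pvBest_snoc]
    have hbound : ∀ q ∈ ps, pvT q.1 q.2 ≤ M → pvT q.1 q.2 ≤ pvBest M ps := (pvBest_stats M ps 0).2
    by_cases hM : pvT p.1 p.2 ≤ M
    · by_cases hlt : pvBest M ps < pvT p.1 p.2
      · rw [if_pos hM, if_pos (le_of_lt hlt), if_pos hlt, if_pos ⟨hM, hlt⟩, pvCollect_snoc,
          pvCollect_nil_of_gt M _ ps (fun q hq hqM => lt_of_le_of_lt (hbound q hq hqM) hlt),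
          if_pos ⟨hM, rfl⟩]
        rfl
      · rw [if_pos hM, if_neg (by omega : ¬ (pvT p.1 p.2 ≤ M ∧ pvBest M ps < pvT p.1 p.2)),
          pvCollect_snoc]
        by_cases heq : pvBest M ps ≤ pvT p.1 p.2
        · have heq' : pvT p.1 p.2 = pvBest M ps := by omega
          rw [if_pos heq, if_neg hlt, if_pos ⟨hM, heq'⟩]
        · rw [if_neg heq, if_neg (by omega : ¬ (pvT p.1 p.2 ≤ M ∧ pvT p.1 p.2 = pvBest M ps)),
            List.append_nil]
    · rw [if_neg hM, if_neg (by omega : ¬ (pvT p.1 p.2 ≤ M ∧ pvBest M ps < pvT p.1 p.2)),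
        pvCollect_snoc, if_neg (by omega : ¬ (pvT p.1 p.2 ≤ M ∧ pvT p.1 p.2 = pvBest M ps)),
        List.append_nil]

theorem pvA_eq (M : Int) (dest ret : List (List Int)) :
    get_optimal_routes M dest ret
      = pvCollect M (pvBest M (pvPairs dest ret)) (pvPairs dest ret) := by
  unfold get_optimal_routes
  rw [pv_foldl_pairs dest ret (fun st d r => pvAStep M d st r) (0, []), pvA_char]

theorem pvBisect_spec (s : List Int) (limit : Int)
    (hs : ∀ i j : Nat, i ≤ j → (hj : j < s.length) → s.getD i 0 ≤ s.getD j 0) :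
    ∀ lo hi : Nat, lo ≤ hi → hi ≤ s.length →
    (∀ j, j < lo → s.getD j 0 ≤ limit) → (∀ j, hi ≤ j → j < s.length → limit < s.getD j 0) →
    lo ≤ pvBisect s limit lo hi ∧ pvBisect s limit lo hi ≤ hi ∧
      (∀ j, j < pvBisect s limit lo hi → s.getD j 0 ≤ limit) ∧
      (∀ j, pvBisect s limit lo hi ≤ j → j < s.length → limit < s.getD j 0) := by
  intro lo hi
  induction lo, hi using pvBisect.induct s limit with
  | case1 lo hi h hle ih =>
    intro hlh hhl hlow hhigh
    rw [pvBisect, dif_pos h, if_pos hle]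
    have := ih (by omega) hhl
      (fun j hj => by
        rcases Nat.lt_or_ge j ((lo + hi) / 2) with hj' | hj'
        · exact le_trans (hs j ((lo+hi)/2) (by omega) (by omega)) hle
        · have : j = (lo + hi) / 2 := by omega
          simpa [this] using hle)
      hhigh
    exact ⟨by omega, this.2.1, this.2.2.1, this.2.2.2⟩
  | case2 lo hi h hgt ih =>
    intro hlh hhl hlow hhigh
    rw [pvBisect, dif_pos h, if_neg hgt]
    have := ih (by omega) (by omega) hlow
      (fun j hj hjl => by
        have : s.getD ((lo+hi)/2) 0 ≤ s.getD j 0 := hs _ _ hj hjl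
        omega)
    exact ⟨this.1, by omega, this.2.2.1, this.2.2.2⟩
  | case3 lo hi h =>
    intro hlh hhl hlow hhigh
    rw [pvBisect, dif_neg h]
    exact ⟨le_refl _, hlh, hlow, fun j hj hjl => hhigh j (by omega) hjl⟩

-- running max (floor b) of the admissible totals, characterized
theorem pvInner_stats (M A : Int) (L : List Int) :
    ∀ b : Int, b ≤ L.foldl (fun b v => if A + v ≤ M ∧ b < A + v then A + v else b) b
      ∧ (L.foldl (fun b v => if A + v ≤ M ∧ b < A + v then A + v else b) b = b
          ∨ ∃ v ∈ L, A + v ≤ M ∧ L.foldl (fun b v => if A + v ≤ M ∧ b < A + v then A + v else b) b = A + v)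
      ∧ ∀ v ∈ L, A + v ≤ M → A + v ≤ L.foldl (fun b v => if A + v ≤ M ∧ b < A + v then A + v else b) b := by
  induction L with
  | nil => intro b; simp
  | cons x t ih =>
    intro b
    simp only [List.foldl_cons, List.mem_cons]
    refine ⟨?_, ?_, ?_⟩
    · have h1 := (ih (if A + x ≤ M ∧ b < A + x then A + x else b)).1
      split_ifs at h1 ⊢ <;> omega
    · rcases (ih (if A + x ≤ M ∧ b < A + x then A + x else b)).2.1 with h | ⟨v, hv, hvM, hr⟩
      · rw [h]
        split_ifs with hc
        · exact Or.inr ⟨x, Or.inl rfl, hc.1, rfl⟩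
        · exact Or.inl rfl
      · exact Or.inr ⟨v, Or.inr hv, hvM, hr⟩
    · rintro v (rfl | hv) hvM
      · have h1 := (ih (if A + v ≤ M ∧ b < A + v then A + v else b)).1
        split_ifs at h1 ⊢ <;> omega
      · exact (ih _).2.2 v hv hvM

-- the sorted distinct sums list: monotone by index, same membership as vals
theorem pvSums_mono (vals : List Int) :
    ∀ i j : Nat, i ≤ j →
      (hj : j < (PySem.List.sorted (PySem.Set.ofList vals) (fun x => x) false).length) →
      (PySem.List.sorted (PySem.Set.ofList vals) (fun x => x) false).getD i 0
        ≤ (PySem.List.sorted (PySem.Set.ofList vals) (fun x => x) false).getD j 0 := by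
  intro i j hij hj
  rcases Nat.eq_or_lt_of_le hij with rfl | hlt
  · exact le_refl _
  · have hp := PySem.List.sorted_ofList_pairwise_lt (xs := vals)
    rw [List.pairwise_iff_getElem] at hp
    rw [List.getD_eq_getElem _ _ (by omega), List.getD_eq_getElem _ _ hj]
    exact le_of_lt (hp i j (by omega) hj hlt)

theorem pvSums_mem (vals : List Int) (x : Int) :
    x ∈ PySem.List.sorted (PySem.Set.ofList vals) (fun x => x) false ↔ x ∈ vals := by
  rw [PySem.List.mem_sorted, PySem.Set.mem_ofList]

theorem pvSums_index (vals : List Int) (v : Int) (hv : v ∈ vals) :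
    ∃ j : Nat, j < (PySem.List.sorted (PySem.Set.ofList vals) (fun x => x) false).length ∧
      (PySem.List.sorted (PySem.Set.ofList vals) (fun x => x) false).getD j 0 = v := by
  rw [← pvSums_mem vals v, List.mem_iff_getElem] at hv
  obtain ⟨j, hjl, rfl⟩ := hv
  exact ⟨j, hjl, List.getD_eq_getElem _ 0 hjl⟩

-- the per-destination inner loop of A equals B's binary-search step
theorem pvInner_eq (M A b : Int) (vals : List Int) :
    vals.foldl (fun b v => if A + v ≤ M ∧ b < A + v then A + v else b) b
      = (let s := PySem.List.sorted (PySem.Set.ofList vals) (fun x => x) false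
         let lo := pvBisect s (M - A) 0 s.length
         if 0 < lo then (if b < A + s.getD (lo - 1) 0 then A + s.getD (lo - 1) 0 else b) else b) := by
  set s := PySem.List.sorted (PySem.Set.ofList vals) (fun x => x) false with hsdef
  have hspec := pvBisect_spec s (M - A) (pvSums_mono vals) 0 s.length (Nat.zero_le _) (le_refl _)
    (fun j hj => absurd hj (Nat.not_lt_zero j)) (fun j hj hjl => absurd hjl (by omega))
  set lo := pvBisect s (M - A) 0 s.length with hlodef
  obtain ⟨-, hhi, hlow, hhigh⟩ := hspec
  simp only []
  by_cases hpos : 0 < lo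
  · rw [if_pos hpos]
    set m := s.getD (lo - 1) 0 with hmdef
    have hmle : m ≤ M - A := hlow (lo - 1) (by omega)
    have hmmem : m ∈ vals := by
      rw [← pvSums_mem vals m, hmdef, List.getD_eq_getElem _ _ (by omega)]
      exact List.getElem_mem _
    have hidx := pvSums_index vals
    have hmax : ∀ v ∈ vals, A + v ≤ M → v ≤ m := by
      intro v hv hvM
      obtain ⟨j, hjl, hjv⟩ := hidx v hv
      rw [← hsdef] at hjl hjv
      rcases Nat.lt_or_ge j lo with hj | hj
      · rw [hmdef, ← hjv]
        exact pvSums_mono vals j (lo - 1) (by omega) (by rw [← hsdef]; omega)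
      · have := hhigh j hj hjl
        omega
    obtain ⟨h1, h2, h3⟩ := pvInner_stats M A vals b
    have hm := h3 m hmmem (by omega)
    rcases h2 with h | ⟨v, hv, hvM, hr⟩ <;> [skip; have := hmax v hv hvM] <;>
      split_ifs <;> omega
  · rw [if_neg hpos]
    have hnone : ∀ v ∈ vals, ¬ (A + v ≤ M) := by
      intro v hv
      obtain ⟨j, hjl, hjv⟩ := pvSums_index vals v hv
      rw [← hsdef] at hjl hjv
      have := hhigh j (by omega) hjl
      omega
    rw [PySem.List.foldl_congr_mem vals _ (fun acc _ => acc) b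
      (fun acc x hx => if_neg (fun hc : A + x ≤ M ∧ acc < A + x => hnone x hx hc.1)),
      PySem.List.foldl_ignore]

-- B's grouping dict looks up to the return legs with a given distance, in order
theorem pvDict_getD (ret : List (List Int)) (v : Int) :
    (ret.foldl (fun (dic : PySem.Dict Int (List Int)) r =>
        dic.modify (r.getD 1 0) [] (· ++ [r.getD 0 0])) PySem.Dict.empty).getD v []
      = ((ret.filter (fun r => r.getD 1 0 == v)).map (fun r => r.getD 0 0)) := by
  have h := PySem.Dict.getD_foldl_modify_append
    (ret.map (fun r => (r.getD 1 0, r.getD 0 0))) (PySem.Dict.empty) v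
  rw [List.foldl_map] at h
  rw [h, List.filter_map]
  simp [Function.comp_def, List.map_map]

-- the admissible-and-optimal filter, as B's dict lookup, given best ≤ M
theorem pvRow_eq (M best : Int) (d : List Int) (ret : List (List Int)) (hbM : best ≤ M) :
    ret.filterMap (fun r => if pvT d r ≤ M ∧ pvT d r = best
        then some [d.getD 0 0, r.getD 0 0] else none)
      = ((ret.filter (fun r => r.getD 1 0 == best - d.getD 1 0)).map (fun r => r.getD 0 0)).map
          (fun r0 => [d.getD 0 0, r0]) := by
  induction ret with
  | nil => rfl
  | cons r t ih =>
    simp only [List.filterMap_cons, List.filter_cons]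
    by_cases hc : r.getD 1 0 = best - d.getD 1 0
    · have : pvT d r ≤ M ∧ pvT d r = best := by unfold pvT; omega
      rw [if_pos this, if_pos (by simpa using hc), List.map_cons, List.map_cons, ih]
    · have : ¬ (pvT d r ≤ M ∧ pvT d r = best) := by unfold pvT; omega
      rw [if_neg this, if_neg (by simpa using hc), ih]

-- B's best computation agrees with A's running best
theorem pvB_best_eq (M : Int) (dest ret : List (List Int)) :
    dest.foldl (fun b d =>
        let sums := PySem.List.sorted (PySem.Set.ofList (ret.map (fun r => r.getD 1 0))) (fun x => x) false
        let lo := pvBisect sums (M - d.getD 1 0) 0 sums.length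
        if 0 < lo then
          if b < d.getD 1 0 + sums.getD (lo - 1) 0 then d.getD 1 0 + sums.getD (lo - 1) 0 else b
        else b) 0
      = pvBest M (pvPairs dest ret) := by
  rw [pvBest, ← pv_foldl_pairs dest ret
    (fun b d r => if pvT d r ≤ M ∧ b < pvT d r then pvT d r else b) 0]
  apply PySem.List.foldl_congr_mem
  intro b d _
  have h := (pvInner_eq M (d.getD 1 0) b (ret.map (fun r => r.getD 1 0))).symm
  rw [List.foldl_map] at h
  simp only [pvT]
  exact h

-- the collection phase, written per destination
theorem pvCollect_flat (M best : Int) (dest ret : List (List Int)) :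
    pvCollect M best (pvPairs dest ret)
      = dest.flatMap (fun d => ret.filterMap (fun r => if pvT d r ≤ M ∧ pvT d r = best
          then some [d.getD 0 0, r.getD 0 0] else none)) := by
  rw [pvCollect, pvPairs, List.filterMap_flatMap]
  simp only [List.filterMap_map, Function.comp_def]

-- ===== VERDICT (by name: the statement is the Claim_ definition above) =====
theorem get_optimal_routes_spec : Claim_equal_get_optimal_routes := by
  unfold Claim_equal_get_optimal_routes
  intro M dest ret _hdom _hpre
  unfold Spec_get_optimal_routes
  rw [pvA_eq]
  unfold get_optimal_routes_alt
  by_cases hG : M < 0 ∨ dest = [] ∨ ret = []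
  · rw [if_pos hG, pvCollect, List.filterMap_eq_nil_iff]
    intro p hp
    rcases hG with hM | rfl | rfl
    · have := pvBest_nonneg M (pvPairs dest ret)
      exact if_neg (fun hc : _ ∧ _ => by omega)
    · simp [pvPairs] at hp
    · simp [pvPairs] at hp
  · rw [if_neg hG]
    have hM : ¬ M < 0 := fun h => hG (Or.inl h)
    simp only []
    rw [pvB_best_eq M dest ret, pvCollect_flat,
      PySem.List.foldl_append_eq_flatMap, List.nil_append]
    congr 1
    funext d
    rw [pvDict_getD, pvRow_eq M _ d ret (pvBest_le M _ (by omega))]
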